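-- pv_equiv track=rewrite | github.com/nghess/clickbait-place | dry_morris_maze/dmm_tripleclick.py | get_platform_excluded_cells
-- ===== SOURCE A (Python) =====
-- PLATFORM_COLS = 2
--
-- PLATFORM_ROWS = 4
--
-- def get_platform_excluded_cells(flip_state, grid_cells_x, grid_cells_y):
--     """Return the set of inner-grid cell indices that overlap with the platform rect.
--
--     The platform spans full-grid cells; any that fall within the inner grid
--     (full-grid cols 1 to grid_cells_x-2, rows 1 to grid_cells_y-2) are excluded.
--     """
--     inner_cols = grid_cells_x - 2
--     inner_rows = grid_cells_y - 2
--
--     if flip_state == 0: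
--         col_start = grid_cells_x - PLATFORM_COLS
--         row_start = 1
--     else:
--         col_start = 0
--         row_start = grid_cells_y - 1 - PLATFORM_ROWS
--
--     excluded = set()
--     for fg_row in range(row_start, row_start + PLATFORM_ROWS):
--         for fg_col in range(col_start, col_start + PLATFORM_COLS):
--             # Convert full-grid coords to inner-grid coords
--             inner_col = fg_col - 1
--             inner_row = fg_row - 1
--             if 0 <= inner_col < inner_cols and 0 <= inner_row < inner_rows:
--                 idx = inner_row * inner_cols + inner_col
--                 excluded.add(idx)
--
--     return excluded
-- ===== SOURCE B (Python) =====
-- PLATFORM_COLS = 2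
--
-- PLATFORM_ROWS = 4
--
-- def get_platform_excluded_cells(flip_state, grid_cells_x, grid_cells_y):
--     """Overlap of the platform rect with the inner grid, computed by interval
--     intersection; the overlap cells are then enumerated by a SINGLE flat loop
--     over the overlap area, recovering row/col with divmod -- no nested loops,
--     no per-cell bounds check."""
--     inner_cols = grid_cells_x - 2
--     inner_rows = grid_cells_y - 2
--     if flip_state == 0:
--         c0, r0 = grid_cells_x - PLATFORM_COLS - 1, 0
--     else:
--         c0, r0 = -1, grid_cells_y - 2 - PLATFORM_ROWS
--     w = min(inner_cols, c0 + PLATFORM_COLS) - max(0, c0)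
--     h = min(inner_rows, r0 + PLATFORM_ROWS) - max(0, r0)
--     if w <= 0 or h <= 0:
--         return set()
--     base = max(0, r0) * inner_cols + max(0, c0)
--     return {base + (k // w) * inner_cols + (k % w) for k in range(h * w)}
-- ===== Notes on version B (the rewrite author's own statement) =====
-- stated objective: alternative
-- what changed: Replaces A's nested generate-and-filter loops over all PLATFORM_COLS*PLATFORM_ROWS platform cells (per-cell bounds check) by computing the overlap rectangle via interval intersection and then enumerating its cells with a SINGLE flat loop over the overlap area, recovering row and column with divmod; an empty overlap is returned immediately with no loop at all.
import Mathlib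
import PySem

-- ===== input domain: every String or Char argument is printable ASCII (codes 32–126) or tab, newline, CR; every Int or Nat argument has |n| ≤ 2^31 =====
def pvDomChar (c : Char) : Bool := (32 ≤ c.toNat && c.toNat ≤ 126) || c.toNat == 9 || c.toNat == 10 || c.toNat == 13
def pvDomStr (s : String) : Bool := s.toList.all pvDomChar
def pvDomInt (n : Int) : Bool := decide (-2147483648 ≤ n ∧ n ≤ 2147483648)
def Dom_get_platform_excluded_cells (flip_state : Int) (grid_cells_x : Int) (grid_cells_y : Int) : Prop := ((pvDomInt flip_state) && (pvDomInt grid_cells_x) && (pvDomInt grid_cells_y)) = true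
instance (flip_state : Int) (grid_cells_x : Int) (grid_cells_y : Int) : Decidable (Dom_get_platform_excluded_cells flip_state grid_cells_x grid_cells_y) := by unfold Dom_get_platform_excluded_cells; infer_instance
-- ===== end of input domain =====

-- B replaces A's nested generate-and-filter loops over the platform cells by an interval
-- intersection (overlap rectangle) enumerated with ONE flat divmod loop over the overlap area;
-- objective: alternative decomposition, same cost.

-- ===== PORT A =====
-- PLATFORM_COLS = 2, PLATFORM_ROWS = 4 (module constants, inlined)
def get_platform_excluded_cells (flip_state : Int) (grid_cells_x : Int) (grid_cells_y : Int) : List Int :=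
  let inner_cols := grid_cells_x - 2
  let inner_rows := grid_cells_y - 2
  let sr := if flip_state = 0 then (grid_cells_x - 2, (1 : Int))
            else ((0 : Int), grid_cells_y - 1 - 4)
  let col_start := sr.1
  let row_start := sr.2
  (PySem.List.pyRange row_start (row_start + 4) 1).foldl (fun excluded fg_row =>
    (PySem.List.pyRange col_start (col_start + 2) 1).foldl (fun excluded fg_col =>
      let inner_col := fg_col - 1
      let inner_row := fg_row - 1
      if 0 ≤ inner_col ∧ inner_col < inner_cols ∧ (0 ≤ inner_row ∧ inner_row < inner_rows) then
        PySem.Set.add excluded (inner_row * inner_cols + inner_col)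
      else excluded) excluded)
    (PySem.Set.empty)

-- ===== PORT B =====
def get_platform_excluded_cells_alt (flip_state : Int) (grid_cells_x : Int) (grid_cells_y : Int) : List Int :=
  let inner_cols := grid_cells_x - 2
  let inner_rows := grid_cells_y - 2
  let p := if flip_state = 0 then (grid_cells_x - 2 - 1, (0 : Int))
           else ((-1 : Int), grid_cells_y - 2 - 4)
  let c0 := p.1
  let r0 := p.2
  let w := min inner_cols (c0 + 2) - max 0 c0
  let h := min inner_rows (r0 + 4) - max 0 r0
  if w ≤ 0 ∨ h ≤ 0 then []
  else
    let base := max 0 r0 * inner_cols + max 0 c0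
    PySem.Set.ofList ((PySem.List.pyRange 0 (h * w) 1).map
      (fun k => base + PySem.Int.floordiv k w * inner_cols + PySem.Int.mod k w))

-- ===== PRECONDITION & SPEC =====
def Spec_get_platform_excluded_cells (flip_state : Int) (grid_cells_x : Int) (grid_cells_y : Int) (out : List Int) : Prop := out = get_platform_excluded_cells_alt flip_state grid_cells_x grid_cells_y
instance (flip_state : Int) (grid_cells_x : Int) (grid_cells_y : Int) (out : List Int) : Decidable (Spec_get_platform_excluded_cells flip_state grid_cells_x grid_cells_y out) := by unfold Spec_get_platform_excluded_cells; infer_instance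

-- ===== CLAIM (what is proved, stated in full; the proofs are below) =====
def Claim_equal_get_platform_excluded_cells : Prop := ∀ (flip_state : Int) (grid_cells_x : Int) (grid_cells_y : Int), Dom_get_platform_excluded_cells flip_state grid_cells_x grid_cells_y → Spec_get_platform_excluded_cells flip_state grid_cells_x grid_cells_y (get_platform_excluded_cells flip_state grid_cells_x grid_cells_y)

-- ===== LEMMAS AND PROOFS =====

-- A consecutive range filtered by an interval predicate is the clamped range.
theorem pv_filter_pyRange (n : Nat) : ∀ (a lo hi : Int),
    (PySem.List.pyRange a (a + n) 1).filter (fun x => decide (lo ≤ x) && decide (x < hi))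
      = PySem.List.pyRange (max lo a) (min hi (a + n)) 1 := by
  induction n with
  | zero =>
    intro a lo hi
    rw [PySem.List.pyRange_one_eq_nil (by omega), PySem.List.pyRange_one_eq_nil (by omega)]
    rfl
  | succ n ih =>
    intro a lo hi
    rw [PySem.List.pyRange_one_cons (by push_cast; omega)]
    rw [show ((a + ((n+1 : Nat) : Int)) = (a + 1) + (n : Int)) from by push_cast; ring]
    by_cases hlo : lo ≤ a
    · by_cases hhi : a < hi
      · rw [List.filter_cons_of_pos (by simp [hlo, hhi]), ih]
        rw [PySem.List.pyRange_one_cons (a := max lo a) (by omega)]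
        rw [show max lo a = a from by omega, show max lo (a + 1) = a + 1 from by omega]
      · rw [List.filter_cons_of_neg (by simp [hhi]), ih]
        rw [PySem.List.pyRange_one_eq_nil (by omega), PySem.List.pyRange_one_eq_nil (by omega)]
    · rw [List.filter_cons_of_neg (by simp [hlo]), ih]
      rw [show max lo (a + 1) = max lo a from by omega]

-- Adding a constant to every element of a consecutive range shifts the range.
theorem pv_map_add_pyRange (k a b : Int) :
    (PySem.List.pyRange a b 1).map (fun x => k + x) = PySem.List.pyRange (k + a) (k + b) 1 := by
  rw [PySem.List.pyRange_one, PySem.List.pyRange_one, List.map_map]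
  rw [show (k + b - (k + a)) = b - a from by ring]
  exact List.map_congr_left (fun x _ => by simp [Function.comp]; ring)

-- A conditional flatMap is a flatMap over the filtered list.
theorem pv_flatMap_if {α β : Type} (p : α → Prop) [DecidablePred p] (g : α → List β) :
    ∀ (l : List α), (l.flatMap (fun x => if p x then g x else []))
      = (l.filter (fun x => decide (p x))).flatMap g := by
  intro l
  induction l with
  | nil => rfl
  | cons x t ih =>
    by_cases h : p x
    · simp [List.flatMap_cons, h, ih]
    · simp [List.flatMap_cons, h, ih]

-- A nested fold is a fold over the concatenation of the inner lists.
theorem pv_foldl_foldl {α β γ : Type} (f : γ → β → γ) (g : α → List β) :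
    ∀ (l : List α) (s : γ),
      l.foldl (fun acc x => (g x).foldl f acc) s = (l.flatMap g).foldl f s := by
  intro l
  induction l with
  | nil => intro s; rfl
  | cons x t ih => intro s; simp only [List.foldl_cons, List.flatMap_cons, List.foldl_append, ih]

-- A's nested generate-and-filter loop over the platform rect equals, as a set, the
-- row-by-row flatMap of the clamped (intersected) per-row index ranges.
theorem pv_main (cs rs icols irows : Int) :
    (PySem.List.pyRange rs (rs + 4) 1).foldl (fun excluded fg_row =>
      (PySem.List.pyRange cs (cs + 2) 1).foldl (fun excluded fg_col =>
        if 0 ≤ fg_col - 1 ∧ fg_col - 1 < icols ∧ (0 ≤ fg_row - 1 ∧ fg_row - 1 < irows) then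
          PySem.Set.add excluded ((fg_row - 1) * icols + (fg_col - 1))
        else excluded) excluded) (PySem.Set.empty)
    = PySem.Set.ofList ((PySem.List.pyRange (max 0 (rs - 1)) (min irows (rs - 1 + 4)) 1).flatMap
        (fun r => PySem.List.pyRange (r * icols + max 0 (cs - 1)) (r * icols + min icols (cs - 1 + 2)) 1)) := by
  have step1 : ∀ (fg_row : Int) (excluded : PySem.Set Int),
      (PySem.List.pyRange cs (cs + 2) 1).foldl (fun excluded fg_col =>
        if 0 ≤ fg_col - 1 ∧ fg_col - 1 < icols ∧ (0 ≤ fg_row - 1 ∧ fg_row - 1 < irows) then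
          PySem.Set.add excluded ((fg_row - 1) * icols + (fg_col - 1))
        else excluded) excluded
      = ((if 0 ≤ fg_row - 1 ∧ fg_row - 1 < irows then
            PySem.List.pyRange ((fg_row - 1) * icols + max 0 (cs - 1)) ((fg_row - 1) * icols + min icols (cs - 1 + 2)) 1
          else []).foldl PySem.Set.add excluded) := by
    intro fg_row excluded
    rw [PySem.List.foldl_ite_eq_foldl_filter
      (p := fun fg_col => 0 ≤ fg_col - 1 ∧ fg_col - 1 < icols ∧ (0 ≤ fg_row - 1 ∧ fg_row - 1 < irows))
      (f := fun excluded fg_col => PySem.Set.add excluded ((fg_row - 1) * icols + (fg_col - 1)))]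
    by_cases hrow : 0 ≤ fg_row - 1 ∧ fg_row - 1 < irows
    · rw [if_pos hrow]
      have hfe : (PySem.List.pyRange cs (cs + 2) 1).filter
            (fun fg_col => decide (0 ≤ fg_col - 1 ∧ fg_col - 1 < icols ∧ (0 ≤ fg_row - 1 ∧ fg_row - 1 < irows)))
          = (PySem.List.pyRange cs (cs + 2) 1).filter (fun x => decide (1 ≤ x) && decide (x < icols + 1)) := by
        refine List.filter_congr (fun x _ => ?_)
        rw [show (decide (1 ≤ x) && decide (x < icols + 1))
              = decide ((1 ≤ x) ∧ x < icols + 1) from (Bool.decide_and _ _).symm,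
          decide_eq_decide]
        constructor
        · rintro ⟨h1, h2, _⟩; exact ⟨by omega, by omega⟩
        · rintro ⟨h1, h2⟩; exact ⟨by omega, by omega, hrow⟩
      rw [hfe, show (cs + 2) = cs + ((2 : Nat) : Int) from by norm_num,
        pv_filter_pyRange 2 cs 1 (icols + 1)]
      have hmap : PySem.List.pyRange ((fg_row - 1) * icols + max 0 (cs - 1)) ((fg_row - 1) * icols + min icols (cs - 1 + 2)) 1
          = (PySem.List.pyRange (max 1 cs) (min (icols + 1) (cs + ((2:Nat):Int))) 1).map
              (fun x => (fg_row - 1) * icols - 1 + x) := by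
        rw [pv_map_add_pyRange]
        generalize (fg_row - 1) * icols = t
        congr 1 <;> [skip; skip] <;> push_cast <;> omega
      rw [hmap, List.foldl_map]
      exact PySem.List.foldl_congr_mem _ _ _ _ (fun acc x _ => by congr 1; ring)
    · rw [if_neg hrow]
      have : (PySem.List.pyRange cs (cs + 2) 1).filter
            (fun fg_col => decide (0 ≤ fg_col - 1 ∧ fg_col - 1 < icols ∧ (0 ≤ fg_row - 1 ∧ fg_row - 1 < irows)))
          = [] := by
        refine List.filter_eq_nil_iff.mpr (fun x _ => ?_)
        simp only [decide_eq_true_eq]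
        exact fun h => hrow h.2.2
      rw [this]
      rfl
  calc
    (PySem.List.pyRange rs (rs + 4) 1).foldl (fun excluded fg_row =>
      (PySem.List.pyRange cs (cs + 2) 1).foldl (fun excluded fg_col =>
        if 0 ≤ fg_col - 1 ∧ fg_col - 1 < icols ∧ (0 ≤ fg_row - 1 ∧ fg_row - 1 < irows) then
          PySem.Set.add excluded ((fg_row - 1) * icols + (fg_col - 1))
        else excluded) excluded) (PySem.Set.empty)
      = (PySem.List.pyRange rs (rs + 4) 1).foldl (fun excluded fg_row =>
          ((if 0 ≤ fg_row - 1 ∧ fg_row - 1 < irows then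
              PySem.List.pyRange ((fg_row - 1) * icols + max 0 (cs - 1)) ((fg_row - 1) * icols + min icols (cs - 1 + 2)) 1
            else []).foldl PySem.Set.add excluded)) (PySem.Set.empty) := by
        exact PySem.List.foldl_congr_mem _ _ _ _ (fun acc x _ => step1 x acc)
    _ = ((PySem.List.pyRange rs (rs + 4) 1).flatMap (fun fg_row =>
          if 0 ≤ fg_row - 1 ∧ fg_row - 1 < irows then
            PySem.List.pyRange ((fg_row - 1) * icols + max 0 (cs - 1)) ((fg_row - 1) * icols + min icols (cs - 1 + 2)) 1
          else [])).foldl PySem.Set.add (PySem.Set.empty) := by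
        rw [pv_foldl_foldl]
    _ = PySem.Set.ofList ((PySem.List.pyRange (max 0 (rs - 1)) (min irows (rs - 1 + 4)) 1).flatMap
          (fun r => PySem.List.pyRange (r * icols + max 0 (cs - 1)) (r * icols + min icols (cs - 1 + 2)) 1)) := by
        rw [PySem.Set.ofList_eq_foldl]
        congr 1
        calc
          (PySem.List.pyRange rs (rs + 4) 1).flatMap (fun fg_row =>
            if 0 ≤ fg_row - 1 ∧ fg_row - 1 < irows then
              PySem.List.pyRange ((fg_row - 1) * icols + max 0 (cs - 1)) ((fg_row - 1) * icols + min icols (cs - 1 + 2)) 1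
            else [])
            = ((PySem.List.pyRange rs (rs + 4) 1).filter
                (fun fg_row => decide (0 ≤ fg_row - 1 ∧ fg_row - 1 < irows))).flatMap
                (fun fg_row => PySem.List.pyRange ((fg_row - 1) * icols + max 0 (cs - 1)) ((fg_row - 1) * icols + min icols (cs - 1 + 2)) 1) := by
              exact pv_flatMap_if _ _ _
          _ = (PySem.List.pyRange (max 0 (rs - 1)) (min irows (rs - 1 + 4)) 1).flatMap
                (fun r => PySem.List.pyRange (r * icols + max 0 (cs - 1)) (r * icols + min icols (cs - 1 + 2)) 1) := by
              have hfe : (PySem.List.pyRange rs (rs + 4) 1).filter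
                    (fun fg_row => decide (0 ≤ fg_row - 1 ∧ fg_row - 1 < irows))
                  = (PySem.List.pyRange rs (rs + 4) 1).filter (fun x => decide (1 ≤ x) && decide (x < irows + 1)) := by
                refine List.filter_congr (fun x _ => ?_)
                rw [show (decide (1 ≤ x) && decide (x < irows + 1))
                      = decide ((1 ≤ x) ∧ x < irows + 1) from (Bool.decide_and _ _).symm,
                  decide_eq_decide]
                omega
              rw [hfe, show (rs + 4) = rs + ((4 : Nat) : Int) from by norm_num,
                pv_filter_pyRange 4 rs 1 (irows + 1)]
              have hshift : PySem.List.pyRange (max 1 rs) (min (irows + 1) (rs + ((4:Nat):Int))) 1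
                  = (PySem.List.pyRange (max 0 (rs - 1)) (min irows (rs - 1 + 4)) 1).map (fun x => 1 + x) := by
                rw [pv_map_add_pyRange]
                congr 1 <;> push_cast <;> omega
              rw [hshift, List.flatMap_map]
              refine List.flatMap_congr (fun r _ => ?_)
              have h1 : 1 + r - 1 = r := by ring
              rw [h1]

-- B's single flat divmod enumeration of the overlap rectangle equals the row-by-row
-- flatMap of the per-row index ranges (positive width, h rows).
theorem pv_flat (L H icols RL : Int) (hw : 0 < H - L) : ∀ (h : Nat),
    (PySem.List.pyRange 0 ((h : Int) * (H - L)) 1).map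
      (fun k => RL * icols + L + PySem.Int.floordiv k (H - L) * icols + PySem.Int.mod k (H - L))
    = (PySem.List.pyRange RL (RL + (h : Int)) 1).flatMap
        (fun r => PySem.List.pyRange (r * icols + L) (r * icols + H) 1) := by
  intro h
  induction h with
  | zero =>
    rw [PySem.List.pyRange_one_eq_nil (by norm_num), PySem.List.pyRange_one_eq_nil (by norm_num)]
    rfl
  | succ h ih =>
    have hsplit : PySem.List.pyRange 0 (((h + 1 : Nat) : Int) * (H - L)) 1
        = PySem.List.pyRange 0 ((h : Int) * (H - L)) 1
          ++ PySem.List.pyRange ((h : Int) * (H - L)) (((h + 1 : Nat) : Int) * (H - L)) 1 :=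
      PySem.List.pyRange_one_append _ _ _
        (mul_nonneg (Int.natCast_nonneg h) (le_of_lt hw))
        (by push_cast; nlinarith)
    rw [hsplit, List.map_append, ih]
    rw [show RL + ((h + 1 : Nat) : Int) = (RL + (h : Int)) + 1 from by push_cast; ring]
    rw [PySem.List.pyRange_one_succ_right (by omega)]
    rw [List.flatMap_append]
    congr 1
    · simp only [List.flatMap_cons, List.flatMap_nil, List.append_nil]
      have hcong : ∀ k ∈ PySem.List.pyRange ((h : Int) * (H - L)) (((h + 1 : Nat) : Int) * (H - L)) 1,
          RL * icols + L + PySem.Int.floordiv k (H - L) * icols + PySem.Int.mod k (H - L)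
            = ((RL + (h : Int)) * icols + L - (h : Int) * (H - L)) + k := by
        intro k hk
        rw [PySem.List.mem_pyRange_one] at hk
        have hd : PySem.Int.floordiv k (H - L) = (h : Int) := by
          rw [PySem.Int.floordiv_eq_iff_of_pos hw]
          refine ⟨hk.1, ?_⟩
          have := hk.2
          push_cast at this
          linarith
        have hm : PySem.Int.mod k (H - L) = k - (h : Int) * (H - L) := by
          have hfm := PySem.Int.floordiv_mul_add_mod k (H - L)
          rw [hd] at hfm
          linarith
        rw [hd, hm]; ring
      rw [List.map_congr_left hcong, pv_map_add_pyRange]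
      have e1 : (RL + (h : Int)) * icols + L - (h : Int) * (H - L) + (h : Int) * (H - L)
          = (RL + (h : Int)) * icols + L := by ring
      have e2 : (RL + (h : Int)) * icols + L - (h : Int) * (H - L) + ((h + 1 : Nat) : Int) * (H - L)
          = (RL + (h : Int)) * icols + H := by push_cast; ring
      rw [e1, e2]

-- B's whole guarded expression equals the flatMap form, for arbitrary c0/r0 and grid sizes.
theorem pv_B (c0 r0 icols irows : Int) :
    (if min icols (c0 + 2) - max 0 c0 ≤ 0 ∨ min irows (r0 + 4) - max 0 r0 ≤ 0 then ([] : List Int)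
     else PySem.Set.ofList ((PySem.List.pyRange 0
        ((min irows (r0 + 4) - max 0 r0) * (min icols (c0 + 2) - max 0 c0)) 1).map
        (fun k => max 0 r0 * icols + max 0 c0
          + PySem.Int.floordiv k (min icols (c0 + 2) - max 0 c0) * icols
          + PySem.Int.mod k (min icols (c0 + 2) - max 0 c0))))
    = PySem.Set.ofList ((PySem.List.pyRange (max 0 r0) (min irows (r0 + 4)) 1).flatMap
        (fun r => PySem.List.pyRange (r * icols + max 0 c0) (r * icols + min icols (c0 + 2)) 1)) := by
  split_ifs with hcond
  · rcases hcond with hw | hh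
    · have : (PySem.List.pyRange (max 0 r0) (min irows (r0 + 4)) 1).flatMap
          (fun r => PySem.List.pyRange (r * icols + max 0 c0) (r * icols + min icols (c0 + 2)) 1) = [] := by
        refine List.flatMap_eq_nil_iff.mpr (fun r _ => ?_)
        exact PySem.List.pyRange_one_eq_nil (by omega)
      rw [this]; rfl
    · rw [PySem.List.pyRange_one_eq_nil (a := max 0 r0) (by omega)]
      rfl
  · push Not at hcond
    obtain ⟨hw, hh⟩ := hcond
    obtain ⟨n, hn⟩ : ∃ n : Nat, min irows (r0 + 4) - max 0 r0 = (n : Int) :=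
      ⟨(min irows (r0 + 4) - max 0 r0).toNat, by omega⟩
    have hRH : min irows (r0 + 4) = max 0 r0 + (n : Int) := by omega
    rw [hn, hRH]
    exact congrArg PySem.Set.ofList (pv_flat (max 0 c0) (min icols (c0 + 2)) icols (max 0 r0) hw n)

-- ===== VERDICT (by name: the statement is the Claim_ definition above) =====
theorem get_platform_excluded_cells_spec : Claim_equal_get_platform_excluded_cells := by
  intro flip_state gx gy _
  unfold Spec_get_platform_excluded_cells get_platform_excluded_cells get_platform_excluded_cells_alt
  by_cases h : flip_state = 0
  · simp only [if_pos h]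
    rw [pv_main (gx - 2) 1 (gx - 2) (gy - 2), pv_B (gx - 2 - 1) 0 (gx - 2) (gy - 2)]
    norm_num
  · simp only [if_neg h]
    rw [pv_main 0 (gy - 1 - 4) (gx - 2) (gy - 2), pv_B (-1) (gy - 2 - 4) (gx - 2) (gy - 2)]
    have e1 : gy - 1 - 4 - 1 = gy - 2 - 4 := by ring
    have e2 : (0 : Int) - 1 = -1 := by norm_num
    rw [e1, e2]
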